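-- pv_equiv track=rewrite | github.com/Cesar073/Essen-V2 | sources/mod/form.py | Texto_A_Num1
-- ===== SOURCE A (Python) =====
-- def Es_Numero(Valor):
--     try:
--         resultado = float(Valor)
--         return True
--     except ValueError:
--         return False
--
-- def Texto_A_Num1(Texto, Decimales = 0):
--     Aux = ''
--     Coma = False
--     Cont = 0
--     if len(Texto) > 0:
--         for letra in Texto:
--             if Es_Numero(letra) == True:
--                 if Coma == True:
--                     Cont += 1
--                     if Cont <= Decimales:
--                         Aux += letra
--                 else:
--                     Aux += letra
--             else:
--                 if (letra == ',' or letra == '.') and Coma == False: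
--                     Coma = True
--                     Aux += '.'
--     if Decimales == 0:
--         Aux = Aux.replace('.','')
--     return Aux
-- ===== SOURCE B (Python) =====
-- def Es_Numero(Valor):
--     try:
--         resultado = float(Valor)
--         return True
--     except ValueError:
--         return False
--
-- def Texto_A_Num1(Texto, Decimales = 0):
--     sep = next((i for i, c in enumerate(Texto) if c == ',' or c == '.'), None)
--     if sep is None:
--         return ''.join(c for c in Texto if Es_Numero(c))
--     ent = ''.join(c for c in Texto[:sep] if Es_Numero(c))
--     if Decimales == 0:
--         return ent
--     dec = ''.join(c for c in Texto[sep+1:] if Es_Numero(c))[:max(Decimales, 0)]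
--     return ent + '.' + dec
-- ===== Notes on version B (the rewrite author's own statement) =====
-- stated objective: simpler
-- what changed: B replaces A's single stateful scan (Coma flag, decimal counter, trailing replace('.','')) by locating the first ','/'.' separator once, filtering the digits before it, and taking the first Decimales digits after it, handling Decimales==0 by omitting the decimal section instead of a post-hoc replace.
import Mathlib
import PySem

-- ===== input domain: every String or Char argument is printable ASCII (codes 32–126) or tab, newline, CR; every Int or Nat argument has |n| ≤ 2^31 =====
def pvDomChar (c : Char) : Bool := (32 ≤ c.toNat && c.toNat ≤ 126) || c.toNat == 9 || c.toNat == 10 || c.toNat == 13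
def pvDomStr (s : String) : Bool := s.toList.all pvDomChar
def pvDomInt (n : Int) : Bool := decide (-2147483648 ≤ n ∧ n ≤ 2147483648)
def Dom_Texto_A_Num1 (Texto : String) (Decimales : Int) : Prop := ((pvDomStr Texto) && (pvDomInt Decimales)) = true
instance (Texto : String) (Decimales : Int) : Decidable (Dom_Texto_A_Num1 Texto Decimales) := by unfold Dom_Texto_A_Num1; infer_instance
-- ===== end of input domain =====

-- B extracts integer/decimal parts by splitting at the first separator instead of A's
-- single stateful character scan; same O(n) cost, simpler decomposition.

-- ===== PORT A =====
-- Es_Numero: float(Valor) on a SINGLE printable-ASCII character succeeds exactly when it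
-- is one of '0'..'9' (codes 48..57); exact on the stated ASCII domain.
def pvEsNumero (c : Char) : Bool := 48 ≤ c.toNat && c.toNat ≤ 57

-- the 'for letra in Texto' loop, state (Aux, Coma, Cont), branches in A's order
def pvLoopA (Decimales : Int) : List Char → List Char → Bool → Int → List Char × Bool × Int
  | [], aux, coma, cont => (aux, coma, cont)
  | letra :: rest, aux, coma, cont =>
    if pvEsNumero letra then
      if coma then
        let cont' := cont + 1
        if cont' ≤ Decimales then pvLoopA Decimales rest (aux ++ [letra]) coma cont'
        else pvLoopA Decimales rest aux coma cont'
      else pvLoopA Decimales rest (aux ++ [letra]) coma cont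
    else
      if (letra == ',' || letra == '.') && !coma then
        pvLoopA Decimales rest (aux ++ ['.']) true cont
      else pvLoopA Decimales rest aux coma cont

def Texto_A_Num1 (Texto : String) (Decimales : Int) : String :=
  let aux : List Char :=
    if Texto.toList.length > 0 then (pvLoopA Decimales Texto.toList [] false 0).1 else []
  if Decimales == 0 then PySem.Str.replace (String.ofList aux) "." "" else String.ofList aux

-- ===== PORT B =====
-- next((i for i,c in enumerate(Texto) if c==',' or c=='.'), None) → findIdx?;
-- Texto[:sep] / Texto[sep+1:] with nonnegative in-range indices are List.take/drop,
-- the ''.join filters are List.filter, [:max(Decimales,0)] is List.take (exact here).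
def Texto_A_Num1_alt (Texto : String) (Decimales : Int) : String :=
  let cs := Texto.toList
  match cs.findIdx? (fun c => c == ',' || c == '.') with
  | none => String.ofList (cs.filter pvEsNumero)
  | some sep =>
    let ent := (cs.take sep).filter pvEsNumero
    if Decimales == 0 then String.ofList ent
    else
      let dec := ((cs.drop (sep + 1)).filter pvEsNumero).take (max Decimales 0).toNat
      String.ofList (ent ++ '.' :: dec)

-- ===== PRECONDITION & SPEC =====
def Spec_Texto_A_Num1 (Texto : String) (Decimales : Int) (out : String) : Prop := out = Texto_A_Num1_alt Texto Decimales
instance (Texto : String) (Decimales : Int) (out : String) : Decidable (Spec_Texto_A_Num1 Texto Decimales out) := by unfold Spec_Texto_A_Num1; infer_instance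

-- ===== CLAIM (what is proved, stated in full; the proofs are below) =====
def Claim_equal_Texto_A_Num1 : Prop := ∀ (Texto : String) (Decimales : Int), Dom_Texto_A_Num1 Texto Decimales → Spec_Texto_A_Num1 Texto Decimales (Texto_A_Num1 Texto Decimales)

-- ===== LEMMAS AND PROOFS =====

theorem pv_digit_not_sep {c : Char} (h : pvEsNumero c = true) : (c == ',' || c == '.') = false := by
  simp only [pvEsNumero, Bool.and_eq_true, decide_eq_true_eq] at h
  simp only [Bool.or_eq_false_iff, beq_eq_false_iff_ne]
  constructor <;> rintro rfl <;> simp_all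

theorem pv_dot_not_mem_filter (cs : List Char) : '.' ∉ cs.filter pvEsNumero := by
  intro h
  have := (List.mem_filter.mp h).2
  simp [pvEsNumero] at this

theorem pv_go_no_dot (fuel : Nat) (cs acc : List Char) (h : '.' ∉ cs) :
    PySem.Chars.replace.go ['.'] [] fuel cs acc = acc.reverse ++ cs := by
  induction fuel generalizing cs acc with
  | zero => simp [PySem.Chars.replace.go]
  | succ f ih =>
    cases cs with
    | nil => simp [PySem.Chars.replace.go]
    | cons c t =>
      have hc : ('.' == c) = false := by
        simp only [beq_eq_false_iff_ne]; intro h'; exact h (by simp [h'.symm])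
      have ht : '.' ∉ t := fun h' => h (List.mem_cons_of_mem _ h')
      simp [PySem.Chars.replace.go, List.isPrefixOf, hc, ih t (c :: acc) ht]

theorem pv_go_dot_end (ds : List Char) (fuel : Nat) (acc : List Char)
    (h : '.' ∉ ds) (hf : ds.length < fuel) :
    PySem.Chars.replace.go ['.'] [] fuel (ds ++ ['.']) acc = acc.reverse ++ ds := by
  induction ds generalizing acc fuel with
  | nil =>
    obtain ⟨f, rfl⟩ : ∃ f, fuel = f + 1 := ⟨fuel - 1, by omega⟩
    cases f <;> simp [PySem.Chars.replace.go, List.isPrefixOf]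
  | cons d ds' ih =>
    obtain ⟨f, rfl⟩ : ∃ f, fuel = f + 1 := ⟨fuel - 1, by omega⟩
    have hd : ('.' == d) = false := by
      simp only [beq_eq_false_iff_ne]; intro h'; exact h (by simp [h'.symm])
    have hds : '.' ∉ ds' := fun h' => h (List.mem_cons_of_mem _ h')
    have hlen : ds'.length < f := by simpa using Nat.lt_of_succ_lt_succ hf
    simp [PySem.Chars.replace.go, List.isPrefixOf, hd, ih f (d :: acc) hds hlen]

theorem pv_replace_no_dot (l : List Char) (h : '.' ∉ l) :
    PySem.Str.replace (String.ofList l) "." "" = String.ofList l := by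
  have h1 : (".").toList = ['.'] := by decide
  have h2 : ("").toList = ([] : List Char) := by decide
  simp [PySem.Str.replace, PySem.Chars.replace, h1, h2, pv_go_no_dot _ _ _ h]

theorem pv_replace_dot_end (ds : List Char) (h : '.' ∉ ds) :
    PySem.Str.replace (String.ofList (ds ++ ['.'])) "." "" = String.ofList ds := by
  have h1 : (".").toList = ['.'] := by decide
  have h2 : ("").toList = ([] : List Char) := by decide
  have hgo := pv_go_dot_end ds (ds.length + 1) [] h (by omega)
  simp [PySem.Str.replace, PySem.Chars.replace, h1, h2, hgo]

theorem pv_loopA_coma (D : Int) (cs : List Char) (aux : List Char) (cont : Int) :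
    (pvLoopA D cs aux true cont).1 = aux ++ (cs.filter pvEsNumero).take (D - cont).toNat := by
  induction cs generalizing aux cont with
  | nil => simp [pvLoopA]
  | cons c cs ih =>
    by_cases hc : pvEsNumero c = true
    · by_cases hle : cont + 1 ≤ D
      · have ht : (D - cont).toNat = (D - (cont + 1)).toNat + 1 := by omega
        simp [pvLoopA, hc, hle, ih, ht, List.filter_cons_of_pos hc]
      · have h0 : (D - cont).toNat = 0 := by omega
        have h1 : (D - (cont + 1)).toNat = 0 := by omega
        simp [pvLoopA, hc, hle, ih, h0, h1, List.filter_cons_of_pos hc]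
    · have hcf : pvEsNumero c = false := by simpa using hc
      simp [pvLoopA, hcf, ih]

theorem pv_loopA_main (D : Int) (cs : List Char) (aux : List Char) :
    (pvLoopA D cs aux false 0).1 =
      match cs.findIdx? (fun c => c == ',' || c == '.') with
      | none => aux ++ cs.filter pvEsNumero
      | some i => aux ++ (cs.take i).filter pvEsNumero ++
          '.' :: ((cs.drop (i + 1)).filter pvEsNumero).take D.toNat := by
  induction cs generalizing aux with
  | nil => simp [pvLoopA, List.findIdx?_nil]
  | cons c cs ih =>
    by_cases hc : pvEsNumero c = true
    · have hsep := pv_digit_not_sep hc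
      rw [List.findIdx?_cons]
      cases hfi : cs.findIdx? (fun c => c == ',' || c == '.') with
      | none =>
        simp only [hsep]
        have := ih (aux ++ [c])
        rw [hfi] at this
        simp [pvLoopA, hc, this, List.filter_cons_of_pos hc]
      | some i =>
        simp only [hsep]
        have := ih (aux ++ [c])
        rw [hfi] at this
        simp [pvLoopA, hc, this, List.filter_cons_of_pos hc, List.take_succ_cons]
    · have hcf : pvEsNumero c = false := by simpa using hc
      rw [List.findIdx?_cons]
      by_cases hs : (c == ',' || c == '.') = true
      · simp only [hs]
        have := pv_loopA_coma D cs (aux ++ ['.']) 0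
        simp [pvLoopA, hcf, hs, this]
      · have hsf : (c == ',' || c == '.') = false := by simpa using hs
        simp only [hsf]
        cases hfi : cs.findIdx? (fun c => c == ',' || c == '.') with
        | none =>
          have := ih aux
          rw [hfi] at this
          simp [pvLoopA, hcf, hsf, this]
        | some i =>
          have := ih aux
          rw [hfi] at this
          simp [pvLoopA, hcf, hsf, this, List.take_succ_cons]

theorem pv_aux_eq (D : Int) (cs : List Char) :
    (if cs.length > 0 then (pvLoopA D cs [] false 0).1 else []) = (pvLoopA D cs [] false 0).1 := by
  cases cs <;> simp [pvLoopA]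

-- ===== VERDICT (by name: the statement is the Claim_ definition above) =====
theorem Texto_A_Num1_spec : Claim_equal_Texto_A_Num1 := by
  unfold Claim_equal_Texto_A_Num1
  intro Texto D _
  unfold Spec_Texto_A_Num1 Texto_A_Num1 Texto_A_Num1_alt
  rw [pv_aux_eq, pv_loopA_main]
  cases hfi : Texto.toList.findIdx? (fun c => c == ',' || c == '.') with
  | none =>
    by_cases hD : D = 0
    · simp [hfi, hD, pv_replace_no_dot _ (pv_dot_not_mem_filter _)]
    · simp [hfi, hD]
  | some i =>
    by_cases hD : D = 0
    · have hrep := pv_replace_dot_end ((Texto.toList.take i).filter pvEsNumero)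
        (pv_dot_not_mem_filter _)
      have h0 : ((0 : Int)).toNat = 0 := rfl
      simp only [hfi, hD, beq_self_eq_true, if_true, h0, List.take_zero]
      simpa using hrep
    · have hmax : (max D 0).toNat = D.toNat := by omega
      simp [hfi, hD, hmax]
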